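-- pv_equiv track=rewrite | github.com/Adv20202/MultiPrimer_Designer | src/primer/homology_analyzer.py | _build_cigar_and_md
-- ===== SOURCE A (Python) =====
-- from typing import Dict, List, Optional, Callable, Tuple
--
-- def _build_cigar_and_md(
--     qseq: str, sseq: str
-- ) -> Tuple[str, str]:
--     """
--     Build synthetic CIGAR string and MD tag from BLAST aligned
--     query and subject sequences.
--
--     qseq and sseq are equal-length strings where '-' marks gaps.
--     """
--     if not qseq or not sseq:
--         return "", ""
--
--     # Build flat CIGAR ops and MD parts
--     cigar_ops: List[str] = []   # 'M', 'I', 'D' per position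
--     md_parts: List[str] = []
--     match_run = 0
--
--     for q, s in zip(qseq, sseq):
--         if q == '-':
--             # Deletion in query (subject has base, query doesn't)
--             cigar_ops.append('D')
--             if match_run > 0:
--                 md_parts.append(str(match_run))
--                 match_run = 0
--             # Accumulate deletion bases for MD ^XYZ
--             if md_parts and isinstance(md_parts[-1], str) and md_parts[-1].startswith('^'):
--                 md_parts[-1] += s.upper()
--             else:
--                 md_parts.append(f'^{s.upper()}')
--
--         elif s == '-':
--             # Insertion in query (query has base, subject doesn't)
--             cigar_ops.append('I')
--             # Insertions are NOT represented in MD tag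
--
--         elif q.upper() == s.upper():
--             # Match
--             cigar_ops.append('M')
--             match_run += 1
--
--         else:
--             # Mismatch
--             cigar_ops.append('M')
--             if match_run > 0:
--                 md_parts.append(str(match_run))
--                 match_run = 0
--             md_parts.append(s.upper())  # MD records ref base at mismatch
--
--     if match_run > 0:
--         md_parts.append(str(match_run))
--
--     # Compress CIGAR: consecutive same ops -> count+op
--     cigar_str = _compress_cigar(cigar_ops)
--     md_str = ''.join(md_parts)
--
--     return cigar_str, md_str
--
-- def _compress_cigar(ops: List[str]) -> str:
--     """Compress a flat list of CIGAR ops into a standard CIGAR string."""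
--     if not ops:
--         return ""
--
--     parts: List[str] = []
--     current_op = ops[0]
--     count = 1
--
--     for op in ops[1:]:
--         if op == current_op:
--             count += 1
--         else:
--             parts.append(f"{count}{current_op}")
--             current_op = op
--             count = 1
--
--     parts.append(f"{count}{current_op}")
--     return ''.join(parts)
-- ===== SOURCE B (Python) =====
-- from typing import Tuple
--
-- def _build_cigar_and_md(qseq: str, sseq: str) -> Tuple[str, str]:
--     """Run-based decomposition: jump over maximal same-op runs with an
--     index-advancing outer loop, emitting one CIGAR token and one MD block
--     per run (instead of a per-position op list plus a compression pass)."""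
--     if not qseq or not sseq:
--         return "", ""
--
--     def op_of(q: str, s: str) -> str:
--         return 'D' if q == '-' else 'I' if s == '-' else 'M'
--
--     pairs = list(zip(qseq, sseq))
--     n = len(pairs)
--     cigar = []
--     md = []
--     match_run = 0
--     i = 0
--     while i < n:
--         op = op_of(*pairs[i])
--         j = i + 1
--         while j < n and op_of(*pairs[j]) == op:
--             j += 1
--         cigar.append(f"{j - i}{op}")
--         if op == 'D':
--             if match_run:
--                 md.append(str(match_run))
--                 match_run = 0
--             bases = ''.join(s for _, s in pairs[i:j]).upper()
--             if md and md[-1].startswith('^'):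
--                 md[-1] += bases
--             else:
--                 md.append('^' + bases)
--         elif op == 'M':
--             for q, s in pairs[i:j]:
--                 if q.upper() == s.upper():
--                     match_run += 1
--                 else:
--                     if match_run:
--                         md.append(str(match_run))
--                         match_run = 0
--                     md.append(s.upper())
--         i = j
--     if match_run:
--         md.append(str(match_run))
--     return ''.join(cigar), ''.join(md)
-- ===== Notes on version B (the rewrite author's own statement) =====
-- stated objective: alternative
-- what changed: B decomposes the alignment into maximal same-op runs with an index-jumping outer loop (inner while finds each run's end), emitting one CIGAR token per run directly and one MD block per run (a whole '^'+bases block per deletion run, a per-char sub-scan only inside M runs), instead of A's per-position op list followed by a separate run-length-compression pass.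
import Mathlib
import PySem

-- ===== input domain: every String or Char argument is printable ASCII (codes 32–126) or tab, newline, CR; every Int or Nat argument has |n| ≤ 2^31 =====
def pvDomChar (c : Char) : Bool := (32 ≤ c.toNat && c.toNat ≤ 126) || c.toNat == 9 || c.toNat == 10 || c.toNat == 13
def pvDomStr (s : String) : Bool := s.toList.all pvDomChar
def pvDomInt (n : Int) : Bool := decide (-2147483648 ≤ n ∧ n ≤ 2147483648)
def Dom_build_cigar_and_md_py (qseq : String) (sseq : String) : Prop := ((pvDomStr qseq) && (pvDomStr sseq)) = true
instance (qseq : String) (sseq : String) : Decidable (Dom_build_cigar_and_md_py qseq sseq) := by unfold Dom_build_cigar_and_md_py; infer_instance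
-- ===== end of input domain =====

-- B replaces A's per-position op list + separate RLE-compression pass by a run-based
-- decomposition: one outer loop that jumps over each maximal same-op run, emitting one
-- CIGAR token and one MD block per run; same values, objective: alternative.

-- ===== PORT A =====
-- helper _compress_cigar: its for-loop over ops[1:] as a foldl with state (parts, current_op, count)
def pvCompressStep (acc : List (List Char) × List Char × Int) (op : List Char) :
    List (List Char) × List Char × Int :=
  if op = acc.2.1 then (acc.1, acc.2.1, acc.2.2 + 1)
  else (acc.1 ++ [PySem.Int.toChars acc.2.2 ++ acc.2.1], op, 1)

def pvCompressCigar (ops : List (List Char)) : String :=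
  match ops with
  | [] => ""
  | o0 :: rest =>
    let r := rest.foldl pvCompressStep ([], o0, 1)
    String.ofList (PySem.Chars.join [] (r.1 ++ [PySem.Int.toChars r.2.2 ++ r.2.1]))

-- A's loop body; state (cigar_ops, md_parts, match_run); `.head? = some '^'` is startswith('^')
def pvStepA (acc : List (List Char) × List (List Char) × Int) (qs : Char × Char) :
    List (List Char) × List (List Char) × Int :=
  let (ops, md, run) := acc
  if qs.1 = '-' then
    let f := if run > 0 then (md ++ [PySem.Int.toChars run], (0 : Int)) else (md, run)
    if f.1 ≠ [] ∧ (f.1.getLastD []).head? = some '^' then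
      (ops ++ [['D']], f.1.dropLast ++ [f.1.getLastD [] ++ [PySem.Chars.upperChar qs.2]], f.2)
    else
      (ops ++ [['D']], f.1 ++ [['^', PySem.Chars.upperChar qs.2]], f.2)
  else if qs.2 = '-' then (ops ++ [['I']], md, run)
  else if PySem.Chars.upperChar qs.1 = PySem.Chars.upperChar qs.2 then
    (ops ++ [['M']], md, run + 1)
  else
    let f := if run > 0 then (md ++ [PySem.Int.toChars run], (0 : Int)) else (md, run)
    (ops ++ [['M']], f.1 ++ [[PySem.Chars.upperChar qs.2]], f.2)

def build_cigar_and_md_py (qseq : String) (sseq : String) : String × String :=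
  if qseq.toList = [] ∨ sseq.toList = [] then ("", "")
  else
    let r := (qseq.toList.zip sseq.toList).foldl pvStepA ([], [], 0)
    let md := if r.2.2 > 0 then r.2.1 ++ [PySem.Int.toChars r.2.2] else r.2.1
    (pvCompressCigar r.1, String.ofList (PySem.Chars.join [] md))

-- ===== PORT B =====
-- op_of(q, s)
def pvOp (qs : Char × Char) : Char :=
  if qs.1 = '-' then 'D' else if qs.2 = '-' then 'I' else 'M'

-- B's inner per-char loop over an M run; state (md_parts, match_run)
def pvMRun (st : List (List Char) × Int) (qs : Char × Char) : List (List Char) × Int :=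
  if PySem.Chars.upperChar qs.1 = PySem.Chars.upperChar qs.2 then (st.1, st.2 + 1)
  else
    let f := if st.2 > 0 then (st.1 ++ [PySem.Int.toChars st.2], (0 : Int)) else st
    (f.1 ++ [[PySem.Chars.upperChar qs.2]], f.2)

-- B's outer while loop: split off the maximal run of the same op (the inner `while j < n` loop),
-- emit its CIGAR token and MD block, continue on the rest
def pvBLoop (pairs : List (Char × Char)) (cigar md : List (List Char)) (run : Int) :
    List (List Char) × List (List Char) × Int :=
  match pairs with
  | [] => (cigar, md, run)
  | p :: rest =>
    let op := pvOp p
    let r := rest.takeWhile (fun x => pvOp x = op)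
    let rest' := rest.dropWhile (fun x => pvOp x = op)
    let cigar' := cigar ++ [PySem.Int.toChars (1 + (r.length : Int)) ++ [op]]
    if op = 'D' then
      let f := if run > 0 then (md ++ [PySem.Int.toChars run], (0 : Int)) else (md, run)
      let bases := (p :: r).map (fun x => PySem.Chars.upperChar x.2)
      let md' := if f.1 ≠ [] ∧ (f.1.getLastD []).head? = some '^'
        then f.1.dropLast ++ [f.1.getLastD [] ++ bases]
        else f.1 ++ ['^' :: bases]
      pvBLoop rest' cigar' md' f.2
    else if op = 'M' then
      let st := (p :: r).foldl pvMRun (md, run)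
      pvBLoop rest' cigar' st.1 st.2
    else
      pvBLoop rest' cigar' md run
  termination_by pairs.length
  decreasing_by
    all_goals simp only [List.length_cons]
    all_goals exact Nat.lt_succ_of_le (List.length_dropWhile_le _ _)

def build_cigar_and_md_py_alt (qseq : String) (sseq : String) : String × String :=
  if qseq.toList = [] ∨ sseq.toList = [] then ("", "")
  else
    let r := pvBLoop (qseq.toList.zip sseq.toList) [] [] 0
    let md := if r.2.2 > 0 then r.2.1 ++ [PySem.Int.toChars r.2.2] else r.2.1
    (String.ofList (PySem.Chars.join [] r.1), String.ofList (PySem.Chars.join [] md))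

-- ===== PRECONDITION & SPEC =====
def Spec_build_cigar_and_md_py (qseq : String) (sseq : String) (out : String × String) : Prop := out = build_cigar_and_md_py_alt qseq sseq
instance (qseq : String) (sseq : String) (out : String × String) : Decidable (Spec_build_cigar_and_md_py qseq sseq out) := by unfold Spec_build_cigar_and_md_py; infer_instance

-- ===== CLAIM (what is proved, stated in full; the proofs are below) =====
def Claim_equal_build_cigar_and_md_py : Prop := ∀ (qseq : String) (sseq : String), Dom_build_cigar_and_md_py qseq sseq → Spec_build_cigar_and_md_py qseq sseq (build_cigar_and_md_py qseq sseq)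

-- ===== LEMMAS AND PROOFS =====

-- the per-column CIGAR op as A records it (a singleton string)
def pvCls (qs : Char × Char) : List Char :=
  if qs.1 = '-' then ['D'] else if qs.2 = '-' then ['I'] else ['M']

-- the MD update A's loop body performs, factored out
def pvMdS (p : List (List Char) × Int) (qs : Char × Char) : List (List Char) × Int :=
  if qs.1 = '-' then
    let f := if p.2 > 0 then (p.1 ++ [PySem.Int.toChars p.2], (0 : Int)) else p
    if f.1 ≠ [] ∧ (f.1.getLastD []).head? = some '^' then
      (f.1.dropLast ++ [f.1.getLastD [] ++ [PySem.Chars.upperChar qs.2]], f.2)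
    else (f.1 ++ [['^', PySem.Chars.upperChar qs.2]], f.2)
  else if qs.2 = '-' then p
  else if PySem.Chars.upperChar qs.1 = PySem.Chars.upperChar qs.2 then (p.1, p.2 + 1)
  else
    let f := if p.2 > 0 then (p.1 ++ [PySem.Int.toChars p.2], (0 : Int)) else p
    (f.1 ++ [[PySem.Chars.upperChar qs.2]], f.2)

theorem pvCls_eq (qs : Char × Char) : pvCls qs = [pvOp qs] := by
  unfold pvCls pvOp; split_ifs <;> rfl

theorem pvStepA_eq (ops md : List (List Char)) (run : Int) (qs : Char × Char) :
    pvStepA (ops, md, run) qs =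
      (ops ++ [pvCls qs], (pvMdS (md, run) qs).1, (pvMdS (md, run) qs).2) := by
  simp only [pvStepA, pvCls, pvMdS]
  split_ifs <;> rfl

theorem pvFoldA_split (zs : List (Char × Char)) :
    ∀ (ops md : List (List Char)) (run : Int),
      zs.foldl pvStepA (ops, md, run) =
        (ops ++ zs.map pvCls, zs.foldl pvMdS (md, run)) := by
  induction zs with
  | nil => intro ops md run; simp
  | cons a t ih =>
    intro ops md run
    simp only [List.foldl_cons, pvStepA_eq, List.map_cons]
    rw [ih]
    simp

-- what pvOp says about the column, case by case
theorem pvOp_D {qs : Char × Char} (h : pvOp qs = 'D') : qs.1 = '-' := by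
  unfold pvOp at h; split_ifs at h with h1 h2 <;> simp_all
theorem pvOp_I {qs : Char × Char} (h : pvOp qs = 'I') : qs.1 ≠ '-' ∧ qs.2 = '-' := by
  unfold pvOp at h; split_ifs at h with h1 h2 <;> simp_all
theorem pvOp_M {qs : Char × Char} (h : pvOp qs = 'M') : qs.1 ≠ '-' ∧ qs.2 ≠ '-' := by
  unfold pvOp at h; split_ifs at h with h1 h2 <;> simp_all

-- continuing a deletion run: each further '-' column appends one base to the '^' part
theorem pvMdS_Dcont (ds : List (Char × Char)) :
    ∀ (md : List (List Char)) (l : List Char), (∀ x ∈ ds, x.1 = '-') →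
      ds.foldl pvMdS (md ++ ['^' :: l], 0) =
        (md ++ ['^' :: (l ++ ds.map (fun x => PySem.Chars.upperChar x.2))], 0) := by
  induction ds with
  | nil => intro md l _; simp
  | cons a t ih =>
    intro md l h
    have ha : a.1 = '-' := h a (by simp)
    simp only [List.foldl_cons]
    have hstep : pvMdS (md ++ ['^' :: l], 0) a =
        (md ++ ['^' :: (l ++ [PySem.Chars.upperChar a.2])], 0) := by
      simp only [pvMdS, ha]
      rw [if_pos trivial]
      norm_num
    rw [hstep, ih _ _ (fun x hx => h x (by simp [hx]))]
    simp

-- a whole deletion run from a nonnegative match_run equals B's one-block update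
theorem pvMdS_Drun (p : Char × Char) (r : List (Char × Char)) (md : List (List Char)) (run : Int)
    (hp : p.1 = '-') (hr : ∀ x ∈ r, x.1 = '-') (hrun : 0 ≤ run) :
    (p :: r).foldl pvMdS (md, run) =
      ((if (if run > 0 then (md ++ [PySem.Int.toChars run], (0 : Int)) else (md, run)).1 ≠ [] ∧
           ((if run > 0 then (md ++ [PySem.Int.toChars run], (0 : Int)) else (md, run)).1.getLastD []).head? = some '^'
        then (if run > 0 then (md ++ [PySem.Int.toChars run], (0 : Int)) else (md, run)).1.dropLast ++
             [(if run > 0 then (md ++ [PySem.Int.toChars run], (0 : Int)) else (md, run)).1.getLastD [] ++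
               (p :: r).map (fun x => PySem.Chars.upperChar x.2)]
        else (if run > 0 then (md ++ [PySem.Int.toChars run], (0 : Int)) else (md, run)).1 ++
             ['^' :: (p :: r).map (fun x => PySem.Chars.upperChar x.2)]), 0) := by
  simp only [List.foldl_cons]
  have hf2 : (if run > 0 then (md ++ [PySem.Int.toChars run], (0 : Int)) else (md, run)).2 = 0 := by
    split_ifs <;> omega
  set f := if run > 0 then (md ++ [PySem.Int.toChars run], (0 : Int)) else (md, run) with hfdef
  have hstep : pvMdS (md, run) p =
      (if f.1 ≠ [] ∧ (f.1.getLastD []).head? = some '^'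
        then f.1.dropLast ++ [f.1.getLastD [] ++ [PySem.Chars.upperChar p.2]]
        else f.1 ++ [['^', PySem.Chars.upperChar p.2]], f.2) := by
    simp only [pvMdS, hp, ← hfdef]
    rw [if_pos trivial]
    split_ifs <;> rfl
  rw [hstep, hf2]
  by_cases hc : f.1 ≠ [] ∧ (f.1.getLastD []).head? = some '^'
  · rw [if_pos hc, if_pos hc]
    obtain ⟨hne, hhead⟩ := hc
    obtain ⟨l, hl⟩ : ∃ l, f.1.getLastD [] = '^' :: l := by
      cases hlast : f.1.getLastD [] with
      | nil => rw [hlast] at hhead; simp at hhead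
      | cons c cs =>
        rw [hlast] at hhead; simp at hhead
        exact ⟨cs, by rw [hhead]⟩
    rw [hl]
    have : ('^' :: l) ++ [PySem.Chars.upperChar p.2] = '^' :: (l ++ [PySem.Chars.upperChar p.2]) := by simp
    rw [this, pvMdS_Dcont r _ _ hr]
    simp
  · rw [if_neg hc, if_neg hc]
    have : f.1 ++ [['^', PySem.Chars.upperChar p.2]] = f.1 ++ ['^' :: [PySem.Chars.upperChar p.2]] := rfl
    rw [this, pvMdS_Dcont r _ _ hr]
    simp

-- on non-gap columns A's MD update is B's inner M-loop body
theorem pvMdS_eq_pvMRun (st : List (List Char) × Int) (qs : Char × Char)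
    (h1 : qs.1 ≠ '-') (h2 : qs.2 ≠ '-') : pvMdS st qs = pvMRun st qs := by
  simp only [pvMdS, pvMRun, if_neg h1, if_neg h2]

theorem pvMdS_Mrun (l : List (Char × Char)) :
    ∀ (st : List (List Char) × Int), (∀ x ∈ l, x.1 ≠ '-' ∧ x.2 ≠ '-') →
      l.foldl pvMdS st = l.foldl pvMRun st := by
  induction l with
  | nil => intro st _; rfl
  | cons a t ih =>
    intro st h
    obtain ⟨h1, h2⟩ := h a (by simp)
    simp only [List.foldl_cons, pvMdS_eq_pvMRun st a h1 h2]
    exact ih _ (fun x hx => h x (by simp [hx]))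

theorem pvMdS_Irun (l : List (Char × Char)) :
    ∀ (st : List (List Char) × Int), (∀ x ∈ l, x.1 ≠ '-' ∧ x.2 = '-') →
      l.foldl pvMdS st = st := by
  induction l with
  | nil => intro st _; rfl
  | cons a t ih =>
    intro st h
    obtain ⟨h1, h2⟩ := h a (by simp)
    have : pvMdS st a = st := by
      simp only [pvMdS, if_neg h1, h2]
      rw [if_pos trivial]
    simp only [List.foldl_cons, this]
    exact ih _ (fun x hx => h x (by simp [hx]))

theorem pvMRun_nonneg (l : List (Char × Char)) :
    ∀ (st : List (List Char) × Int), 0 ≤ st.2 → 0 ≤ (l.foldl pvMRun st).2 := by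
  induction l with
  | nil => intro st h; exact h
  | cons a t ih =>
    intro st h
    simp only [List.foldl_cons]
    apply ih
    simp only [pvMRun]
    split_ifs <;> simp <;> omega

-- the run-length encoding B produces, as a standalone function on op characters
def pvRle (ops : List Char) : List (List Char) :=
  match ops with
  | [] => []
  | o :: rest =>
    (PySem.Int.toChars (1 + ((rest.takeWhile (fun c => c = o)).length : Int)) ++ [o])
      :: pvRle (rest.dropWhile (fun c => c = o))
  termination_by ops.length
  decreasing_by
    simp only [List.length_cons]
    exact Nat.lt_succ_of_le (List.length_dropWhile_le _ _)

-- A's compression fold, finished off, is the run-length encoding with a pending (cur, cnt) run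
theorem pvCompress_eq_rle (n : Nat) : ∀ (ops : List Char), ops.length ≤ n →
    ∀ (parts : List (List Char)) (cur : Char) (cnt : Int),
      (let st := (ops.map (fun c => [c])).foldl pvCompressStep (parts, [cur], cnt)
       st.1 ++ [PySem.Int.toChars st.2.2 ++ st.2.1]) =
      parts ++ (PySem.Int.toChars (cnt + ((ops.takeWhile (fun c => c = cur)).length : Int)) ++ [cur])
        :: pvRle (ops.dropWhile (fun c => c = cur)) := by
  induction n with
  | zero =>
    intro ops hlen parts cur cnt
    have : ops = [] := List.length_eq_zero_iff.mp (Nat.le_zero.mp hlen)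
    subst this; simp [pvRle]
  | succ m ih =>
    intro ops hlen parts cur cnt
    cases ops with
    | nil => simp [pvRle]
    | cons o rest =>
      simp only [List.length_cons] at hlen
      by_cases ho : o = cur
      · have hstep : pvCompressStep (parts, [cur], cnt) [o] = (parts, [cur], cnt + 1) := by
          simp [pvCompressStep, ho]
        simp only [List.map_cons, List.foldl_cons, hstep]
        rw [ih rest (by omega) parts cur (cnt + 1)]
        have ht : (o :: rest).takeWhile (fun c => c = cur) = o :: rest.takeWhile (fun c => c = cur) := by
          simp [ho]
        have hd : (o :: rest).dropWhile (fun c => c = cur) = rest.dropWhile (fun c => c = cur) := by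
          simp [ho]
        rw [ht, hd]
        have harith : cnt + ((o :: rest.takeWhile (fun c => c = cur)).length : Int) =
            cnt + 1 + ((rest.takeWhile (fun c => c = cur)).length : Int) := by
          push_cast [List.length_cons]
          ring
        rw [harith]
      · have hstep : pvCompressStep (parts, [cur], cnt) [o] =
            (parts ++ [PySem.Int.toChars cnt ++ [cur]], [o], 1) := by
          simp only [pvCompressStep]
          rw [if_neg (by simp [ho])]
        simp only [List.map_cons, List.foldl_cons, hstep]
        rw [ih rest (by omega) _ o 1]
        have ht : (o :: rest).takeWhile (fun c => c = cur) = [] := by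
          simp [ho]
        have hd : (o :: rest).dropWhile (fun c => c = cur) = o :: rest := by
          simp [ho]
        rw [ht, hd]
        have hrle : pvRle (o :: rest) =
            (PySem.Int.toChars (1 + ((rest.takeWhile (fun c => c = o)).length : Int)) ++ [o])
              :: pvRle (rest.dropWhile (fun c => c = o)) := by
          rw [pvRle]
        rw [hrle]
        simp

-- takeWhile/dropWhile commute with map pvOp
theorem pvTakeWhile_map (rest : List (Char × Char)) (op : Char) :
    (rest.map pvOp).takeWhile (fun c => c = op) = (rest.takeWhile (fun x => pvOp x = op)).map pvOp := by
  rw [List.takeWhile_map]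
  rfl
theorem pvDropWhile_map (rest : List (Char × Char)) (op : Char) :
    (rest.map pvOp).dropWhile (fun c => c = op) = (rest.dropWhile (fun x => pvOp x = op)).map pvOp := by
  rw [List.dropWhile_map]
  rfl

-- every element of the taken run has the run's op
theorem pvTakeWhile_op (rest : List (Char × Char)) (op : Char) :
    ∀ x ∈ rest.takeWhile (fun x => pvOp x = op), pvOp x = op := by
  intro x hx
  have := List.takeWhile_subset (p := fun x => decide (pvOp x = op)) hx
  have h2 := List.mem_takeWhile_imp hx
  simpa using h2

-- MAIN INVARIANT: B's run loop = append the RLE of the op string, and fold A's MD update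
theorem pvBLoop_spec (n : Nat) : ∀ (zs : List (Char × Char)), zs.length ≤ n →
    ∀ (cigar md : List (List Char)) (run : Int), 0 ≤ run →
      pvBLoop zs cigar md run =
        (cigar ++ pvRle (zs.map pvOp), zs.foldl pvMdS (md, run)) := by
  induction n with
  | zero =>
    intro zs hlen cigar md run _
    have : zs = [] := List.length_eq_zero_iff.mp (Nat.le_zero.mp hlen)
    subst this; simp [pvBLoop, pvRle]
  | succ m ih =>
    intro zs hlen cigar md run hrun
    cases zs with
    | nil => simp [pvBLoop, pvRle]
    | cons p rest =>
      simp only [List.length_cons] at hlen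
      rw [pvBLoop]
      simp only []
      set op := pvOp p with hop
      set r := rest.takeWhile (fun x => pvOp x = op) with hrdef
      set rest' := rest.dropWhile (fun x => pvOp x = op) with hrest'
      have hsplit : rest = r ++ rest' := (List.takeWhile_append_dropWhile).symm
      have hlen' : rest'.length ≤ m := by
        have hle : rest'.length ≤ rest.length := by
          rw [hrest']
          exact List.length_dropWhile_le _ _
        omega
      have hrops : ∀ x ∈ r, pvOp x = op := pvTakeWhile_op rest op
      have hrle : pvRle ((p :: rest).map pvOp) =
          (PySem.Int.toChars (1 + (r.length : Int)) ++ [op]) :: pvRle (rest'.map pvOp) := by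
        simp only [List.map_cons]
        rw [pvRle, ← hop, pvTakeWhile_map, pvDropWhile_map, ← hrdef, ← hrest']
        simp
      have hmd : (p :: rest).foldl pvMdS (md, run) =
          rest'.foldl pvMdS ((p :: r).foldl pvMdS (md, run)) := by
        rw [hsplit]
        rw [show p :: (r ++ rest') = (p :: r) ++ rest' from rfl, List.foldl_append]
      by_cases hD : op = 'D'
      · rw [if_pos hD]
        have hp1 : p.1 = '-' := pvOp_D (hop ▸ hD ▸ rfl)
        have hr1 : ∀ x ∈ r, x.1 = '-' := fun x hx => pvOp_D (hD ▸ hrops x hx)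
        rw [ih rest' hlen']
        · rw [hrle, hmd, pvMdS_Drun p r md run hp1 hr1 hrun]
          have hf2 : (if run > 0 then (md ++ [PySem.Int.toChars run], (0 : Int)) else (md, run)).2 = 0 := by
            split_ifs <;> omega
          rw [hf2]
          simp only [List.append_assoc, List.singleton_append]
        · split_ifs <;> omega
      · rw [if_neg hD]
        by_cases hM : op = 'M'
        · rw [if_pos hM]
          have hprop : ∀ x ∈ p :: r, x.1 ≠ '-' ∧ x.2 ≠ '-' := by
            intro x hx
            rcases List.mem_cons.mp hx with h | h
            · subst h; exact pvOp_M (hop ▸ hM ▸ rfl)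
            · exact pvOp_M (hM ▸ hrops x h)
          rw [ih rest' hlen']
          · rw [hrle, hmd, pvMdS_Mrun _ _ hprop]
            simp only [List.append_assoc, List.singleton_append]
          · exact pvMRun_nonneg _ _ hrun
        · rw [if_neg hM]
          have hI : op = 'I' := by
            have h3 : op = 'D' ∨ op = 'I' ∨ op = 'M' := by
              rw [hop]
              unfold pvOp
              split_ifs <;> simp
            rcases h3 with h | h | h
            · exact absurd h hD
            · exact h
            · exact absurd h hM
          have hprop : ∀ x ∈ p :: r, x.1 ≠ '-' ∧ x.2 = '-' := by
            intro x hx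
            rcases List.mem_cons.mp hx with h | h
            · subst h; exact pvOp_I (hop ▸ hI ▸ rfl)
            · exact pvOp_I (hI ▸ hrops x h)
          rw [ih rest' hlen' _ _ _ hrun]
          rw [hrle, hmd, pvMdS_Irun _ _ hprop]
          simp only [List.append_assoc, List.singleton_append]

-- A's compressed CIGAR of the flat op list is B's run-length encoding, joined
theorem pvCigar_eq (zs : List (Char × Char)) (hzs : zs ≠ []) :
    pvCompressCigar (zs.map pvCls) =
      String.ofList (PySem.Chars.join [] (pvRle (zs.map pvOp))) := by
  cases zs with
  | nil => exact absurd rfl hzs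
  | cons z0 zt =>
    simp only [List.map_cons, pvCls_eq, pvCompressCigar]
    have hmap : zt.map pvCls = (zt.map pvOp).map (fun c => [c]) := by
      simp [pvCls_eq, Function.comp]
    rw [hmap]
    have := pvCompress_eq_rle (zt.map pvOp).length (zt.map pvOp) (le_refl _) [] (pvOp z0) 1
    simp only [] at this
    rw [this]
    have hrle : pvRle (pvOp z0 :: zt.map pvOp) =
        (PySem.Int.toChars (1 + (((zt.map pvOp).takeWhile (fun c => c = pvOp z0)).length : Int))
          ++ [pvOp z0]) :: pvRle ((zt.map pvOp).dropWhile (fun c => c = pvOp z0)) := by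
      rw [pvRle]
    rw [hrle]
    simp

-- ===== VERDICT (by name: the statement is the Claim_ definition above) =====
theorem build_cigar_and_md_py_spec : Claim_equal_build_cigar_and_md_py := by
  intro qseq sseq _
  unfold Spec_build_cigar_and_md_py build_cigar_and_md_py build_cigar_and_md_py_alt
  by_cases h : qseq.toList = [] ∨ sseq.toList = []
  · rw [if_pos h, if_pos h]
  · rw [if_neg h, if_neg h]
    push Not at h
    have hzs : qseq.toList.zip sseq.toList ≠ [] := by
      rcases hql : qseq.toList with _ | ⟨q0, qt⟩
      · exact absurd hql h.1
      rcases hsl : sseq.toList with _ | ⟨s0, st⟩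
      · exact absurd hsl h.2
      simp
    set zs := qseq.toList.zip sseq.toList
    rw [pvFoldA_split zs [] [] 0,
      pvBLoop_spec zs.length zs (le_refl _) [] [] 0 (le_refl 0)]
    simp only [List.nil_append]
    rw [pvCigar_eq zs hzs]
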